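-- pv_equiv track=rewrite | github.com/sDebski/NonogramWithGA | project.py | get_list_from_row
-- ===== SOURCE A (Python) =====
-- def get_list_from_row(array):
--     main_list = []
--     for row in array:
--         counter = 0
--         h_list = []
--         previous = 0
--         for el in row:
--             if el:
--                 counter += 1
--             else:
--                 if previous:
--                     h_list.append(counter)
--                     counter = 0
--             previous = el
--         if previous:
--             h_list.append(counter)
--         if h_list:
--             main_list.append(h_list)
--         else:
--             main_list.append([0])
--
--     return main_list
-- ===== SOURCE B (Python) =====
-- def get_list_from_row(array):
--     main_list = []
--     for row in array:
--         h_list = []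
--         i, n = 0, len(row)
--         while i < n:
--             if row[i]:
--                 j = i
--                 while j < n and row[j]:
--                     j += 1
--                 h_list.append(j - i)
--                 i = j
--             else:
--                 i += 1
--         main_list.append(h_list if h_list else [0])
--     return main_list
-- ===== Notes on version B (the rewrite author's own statement) =====
-- stated objective: alternative
-- what changed: Replaces A's element-by-element state machine (counter/previous flag with deferred appends) by a two-pointer run scan that finds each maximal block of truthy cells and appends its length directly.
import Mathlib
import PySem

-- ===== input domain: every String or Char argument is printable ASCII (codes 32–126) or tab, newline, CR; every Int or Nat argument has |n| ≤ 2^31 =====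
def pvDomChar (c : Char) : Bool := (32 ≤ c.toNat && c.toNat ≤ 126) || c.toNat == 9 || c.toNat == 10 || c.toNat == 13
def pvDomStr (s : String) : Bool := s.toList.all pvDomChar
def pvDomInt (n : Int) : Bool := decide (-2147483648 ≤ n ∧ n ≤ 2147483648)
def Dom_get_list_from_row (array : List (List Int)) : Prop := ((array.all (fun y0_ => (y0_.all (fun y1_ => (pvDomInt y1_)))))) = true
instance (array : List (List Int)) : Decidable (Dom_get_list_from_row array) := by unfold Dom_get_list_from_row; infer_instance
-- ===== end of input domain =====

-- B replaces A's counter/previous state machine by a two-pointer scan over maximal truthy runs; alternative decomposition, same cost.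


-- ===== PORT A =====
-- inner loop state: (counter, h_list, previous)
def pvStepA (st : Int × List Int × Int) (el : Int) : Int × List Int × Int :=
  let (counter, h_list, previous) := st
  if el ≠ 0 then (counter + 1, h_list, el)
  else if previous ≠ 0 then (0, h_list ++ [counter], el)
  else (counter, h_list, el)

def get_list_from_row (array : List (List Int)) : List (List Int) :=
  array.foldl (fun main_list row =>
    let s := row.foldl pvStepA (0, [], 0)
    let h_list := if s.2.2 ≠ 0 then s.2.1 ++ [s.1] else s.2.1
    main_list ++ [if h_list ≠ [] then h_list else [0]]) []

-- ===== PORT B =====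
-- two-pointer run scan: at a truthy cell, measure the maximal truthy block and skip past it
def pvAltRuns : List Int → List Int
  | [] => []
  | x :: xs =>
    if x ≠ 0 then
      ((1 : Int) + (xs.takeWhile (fun y => decide (y ≠ 0))).length) ::
        pvAltRuns (xs.dropWhile (fun y => decide (y ≠ 0)))
    else pvAltRuns xs
termination_by l => l.length
decreasing_by
  · exact Nat.lt_succ_of_le (List.length_dropWhile_le _ _)
  · exact Nat.lt_succ_self _

def get_list_from_row_alt (array : List (List Int)) : List (List Int) :=
  array.map (fun row => let h := pvAltRuns row; if h ≠ [] then h else [0])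

-- ===== PRECONDITION & SPEC =====
def Spec_get_list_from_row (array : List (List Int)) (out : List (List Int)) : Prop := out = get_list_from_row_alt array
instance (array : List (List Int)) (out : List (List Int)) : Decidable (Spec_get_list_from_row array out) := by unfold Spec_get_list_from_row; infer_instance

-- ===== CLAIM (what is proved, stated in full; the proofs are below) =====
def Claim_equal_get_list_from_row : Prop := ∀ (array : List (List Int)), Dom_get_list_from_row array → Spec_get_list_from_row array (get_list_from_row array)

-- ===== LEMMAS AND PROOFS =====

theorem pvAltRuns_nil : pvAltRuns [] = [] := by simp [pvAltRuns]

theorem pvAltRuns_cons (x : Int) (xs : List Int) :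
    pvAltRuns (x :: xs) =
      if x ≠ 0 then
        ((1 : Int) + (xs.takeWhile (fun y => decide (y ≠ 0))).length) ::
          pvAltRuns (xs.dropWhile (fun y => decide (y ≠ 0)))
      else pvAltRuns xs := by
  simp [pvAltRuns]

-- continuation of pvAltRuns when already inside a run of accumulated length c
def pvRunsCont (c : Int) : List Int → List Int
  | [] => [c]
  | x :: xs => if x ≠ 0 then pvRunsCont (c + 1) xs else c :: pvAltRuns xs

theorem pvRunsCont_eq (xs : List Int) : ∀ c : Int,
    pvRunsCont c xs = (c + (xs.takeWhile (fun y => decide (y ≠ 0))).length) ::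
      pvAltRuns (xs.dropWhile (fun y => decide (y ≠ 0))) := by
  induction xs with
  | nil => intro c; simp [pvRunsCont, pvAltRuns_nil]
  | cons x xs ih =>
    intro c
    by_cases hx : x ≠ 0
    · simp [pvRunsCont, hx, List.takeWhile, List.dropWhile, ih (c + 1)]
      ring
    · simp [pvRunsCont, hx, List.takeWhile, List.dropWhile, pvAltRuns_cons]

def pvFinish (s : Int × List Int × Int) : List Int :=
  if s.2.2 ≠ 0 then s.2.1 ++ [s.1] else s.2.1

theorem pvLoop_eq (row : List Int) : ∀ (h : List Int) (c p : Int), (p = 0 → c = 0) →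
    pvFinish (row.foldl pvStepA (c, h, p)) =
      h ++ (if p ≠ 0 then pvRunsCont c row else pvAltRuns row) := by
  induction row with
  | nil =>
    intro h c p hinv
    by_cases hp : p ≠ 0
    · simp [pvFinish, hp, pvRunsCont]
    · simp at hp
      simp [pvFinish, hp, pvAltRuns_nil]
  | cons x xs ih =>
    intro h c p hinv
    by_cases hx : x ≠ 0
    · have step : pvStepA (c, h, p) x = (c + 1, h, x) := by simp [pvStepA, hx]
      rw [List.foldl_cons, step, ih h (c + 1) x (fun h0 => absurd h0 hx)]
      by_cases hp : p ≠ 0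
      · simp [hp, hx, pvRunsCont]
      · simp at hp
        have hc : c = 0 := hinv hp
        simp [hp, hx, hc, pvAltRuns_cons, pvRunsCont_eq]
    · simp at hx
      by_cases hp : p ≠ 0
      · have step : pvStepA (c, h, p) x = (0, h ++ [c], x) := by simp [pvStepA, hx, hp]
        rw [List.foldl_cons, step, ih (h ++ [c]) 0 x (fun _ => rfl)]
        simp [hp, hx, pvRunsCont]
      · simp at hp
        have step : pvStepA (c, h, p) x = (c, h, x) := by simp [pvStepA, hx, hp]
        rw [List.foldl_cons, step, ih h c x (fun _ => hinv hp)]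
        simp [hp, hx, pvAltRuns_cons]

theorem pvRow_eq (row : List Int) :
    (let s := row.foldl pvStepA (0, [], 0)
     let h_list := if s.2.2 ≠ 0 then s.2.1 ++ [s.1] else s.2.1
     if h_list ≠ [] then h_list else [0]) =
    (let h := pvAltRuns row; if h ≠ [] then h else [0]) := by
  have := pvLoop_eq row [] 0 0 (fun _ => rfl)
  simp [pvFinish] at this
  simp [this]

theorem pvFoldl_append_map {α β : Type} (f : α → β) (l : List α) : ∀ acc : List β,
    l.foldl (fun acc a => acc ++ [f a]) acc = acc ++ l.map f := by
  induction l with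
  | nil => intro acc; simp
  | cons x xs ih => intro acc; simp [ih]

-- ===== VERDICT (by name: the statement is the Claim_ definition above) =====
theorem get_list_from_row_spec : Claim_equal_get_list_from_row := by
  intro array _
  show get_list_from_row array = get_list_from_row_alt array
  unfold get_list_from_row get_list_from_row_alt
  rw [pvFoldl_append_map]
  simp only [List.nil_append]
  congr 1
  funext row
  exact pvRow_eq row
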